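-- pv_equiv track=rewrite | github.com/oscmbsp07/lampiran-g-osc | app.py | _row_cells_to_list
-- ===== SOURCE A (Python) =====
-- from typing import Dict, List, Optional, Tuple, Set
--
-- def _row_cells_to_list(cells: Dict[int, object]) -> List[object]:
--     if not cells:
--         return []
--     mx = max(cells.keys())
--     out = [""] * (mx + 1)
--     for k, v in cells.items():
--         out[k] = v
--     return out
-- ===== SOURCE B (Python) =====
-- def _row_cells_to_list(cells):
--     out = []
--     for k, v in sorted(cells.items(), key=lambda kv: kv[0]):
--         out.extend([""] * (k - len(out)))
--         out.append(v)
--     return out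
-- ===== Notes on version B (the rewrite author's own statement) =====
-- stated objective: alternative
-- what changed: B sorts the items by key and builds the row in one left-to-right pass, padding the gap before each key with '' and appending the value, with no max computation, no empty-dict guard and no pre-allocated scatter target; Pre_ excludes dicts with a negative key (A scatters through Python's negative-index wraparound or raises, out of domain for a cells-to-dense-row conversion) and, on the Lean side only, association lists with duplicate keys, which do not represent a Python dict.
-- outside the precondition, e.g. on _row_cells_to_list({-1: 'a', 1: 'b'}): A returns ['', 'b'], B returns ['a', 'b']
import Mathlib
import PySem

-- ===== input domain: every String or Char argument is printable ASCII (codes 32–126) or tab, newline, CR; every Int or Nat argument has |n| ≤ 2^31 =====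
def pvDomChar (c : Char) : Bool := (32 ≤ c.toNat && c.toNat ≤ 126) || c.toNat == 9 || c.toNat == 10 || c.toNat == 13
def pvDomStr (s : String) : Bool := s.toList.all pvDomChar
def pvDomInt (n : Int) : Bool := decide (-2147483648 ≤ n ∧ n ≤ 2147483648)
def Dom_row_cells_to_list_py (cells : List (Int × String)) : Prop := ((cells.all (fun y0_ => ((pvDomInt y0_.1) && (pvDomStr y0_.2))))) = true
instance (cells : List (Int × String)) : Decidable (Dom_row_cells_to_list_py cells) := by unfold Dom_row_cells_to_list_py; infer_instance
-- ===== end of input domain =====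

-- B sorts the items by key and builds the row in a single left-to-right pass (pad the gap, append
-- the value) instead of pre-allocating a max-keyed padded list and scattering items into it;
-- objective: alternative.

-- ===== PORT A =====
def row_cells_to_list_py (cells : List (Int × String)) : List String :=
  if cells = [] then []
  else
    match PySem.List.max? (cells.map (·.1)) (fun x => x) with
    | none => []   -- unreachable: cells ≠ []
    | some mx =>
      let out := PySem.List.pyRepeat [""] (mx + 1)
      cells.foldl (fun out kv => PySem.List.pySetD out kv.1 kv.2) out

-- ===== PORT B =====
def row_cells_to_list_py_alt (cells : List (Int × String)) : List String :=
  (PySem.List.sorted cells (fun kv => kv.1) false).foldl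
    (fun out kv => (out ++ PySem.List.pyRepeat [""] (kv.1 - out.length)) ++ [kv.2]) []

-- ===== PRECONDITION & SPEC =====
-- Pre_ excludes (a) dicts with a negative key: there A either raises IndexError (all keys negative)
-- or scatters through Python's negative-index wraparound, out of domain for a cells-to-dense-row
-- conversion, while B places such keys at the front; and (b) association lists with duplicate keys,
-- which do not represent any Python dict (the generated inputs, images of real dicts, always have
-- distinct keys).
def Pre_row_cells_to_list_py (cells : List (Int × String)) : Prop :=
  (cells.map Prod.fst).Nodup ∧ ∀ p ∈ cells, 0 ≤ p.1
instance (cells : List (Int × String)) : Decidable (Pre_row_cells_to_list_py cells) := by unfold Pre_row_cells_to_list_py; infer_instance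
def pvWitness_row_cells_to_list_py : (List (Int × String)) := [(0, "a"), (2, "b")]

def Spec_row_cells_to_list_py (cells : List (Int × String)) (out : List String) : Prop := out = row_cells_to_list_py_alt cells
instance (cells : List (Int × String)) (out : List String) : Decidable (Spec_row_cells_to_list_py cells out) := by unfold Spec_row_cells_to_list_py; infer_instance

-- ===== CLAIM (what is proved, stated in full; the proofs are below) =====
def Claim_equal_row_cells_to_list_py : Prop := ∀ (cells : List (Int × String)), Dom_row_cells_to_list_py cells → Pre_row_cells_to_list_py cells → Spec_row_cells_to_list_py cells (row_cells_to_list_py cells)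

-- ===== LEMMAS AND PROOFS =====

-- The scatter loop of A preserves the length of the output list.
lemma scatter_length (cells : List (Int × String)) (out : List String) :
    (cells.foldl (fun out kv => PySem.List.pySetD out kv.1 kv.2) out).length = out.length := by
  induction cells generalizing out with
  | nil => rfl
  | cons kv rest ih => simpa [PySem.List.length_pySetD] using ih (PySem.List.pySetD out kv.1 kv.2)

-- Elementwise value of A's scatter loop: with distinct non-negative keys, position j ends up
-- holding the dict's value at key j (first = only match), or the initial entry if j is no key.
lemma scatter_getElem? (cells : List (Int × String)) (out : List String) (j : Nat)
    (hj : j < out.length)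
    (hpos : ∀ p ∈ cells, 0 ≤ p.1)
    (hnd : (cells.map Prod.fst).Nodup) :
    (cells.foldl (fun out kv => PySem.List.pySetD out kv.1 kv.2) out)[j]? =
      some (((PySem.Dict.mk cells).get? (j : Int)).getD (out.getD j "")) := by
  induction cells generalizing out with
  | nil =>
    simp [PySem.Dict.get?, List.getD, List.getElem?_eq_getElem hj]
  | cons kv rest ih =>
    obtain ⟨k, v⟩ := kv
    have hk0 : 0 ≤ k := hpos (k, v) (by simp)
    have hset : PySem.List.pySetD out k v = out.set k.toNat v :=
      PySem.List.pySetD_of_nonneg out v hk0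
    have hcons : (k :: rest.map Prod.fst).Nodup := by simpa using hnd
    have hnd' : (rest.map Prod.fst).Nodup := (List.nodup_cons.mp hcons).2
    have hIH := ih (out.set k.toNat v)
      (by simpa using hj)
      (fun p hp => hpos p (List.mem_cons_of_mem _ hp))
      hnd'
    rw [List.foldl_cons]
    simp only [hset]
    rw [hIH, PySem.Dict.get?_mk_cons]
    by_cases hkj : k = (j : Int)
    · -- key j is written here and, by Nodup, never again in rest
      have hknot : k ∉ rest.map Prod.fst := (List.nodup_cons.mp hcons).1
      have hrest : (PySem.Dict.mk rest).get? (j : Int) = none := by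
        rw [PySem.Dict.get?_eq_none_iff_not_mem_keys]
        simpa [PySem.Dict.keys_mk, hkj] using hknot
      have hkt : k.toNat = j := by omega
      simp [hkj, hrest, List.getD_eq_getElem?_getD, hj]
    · -- a different position is written; entry j is untouched
      have hne : (k == (j : Int)) = false := by simp [hkj]
      have htne : k.toNat ≠ j := by omega
      simp only [hne, Bool.false_eq_true, if_false]
      congr 1
      rcases h : (PySem.Dict.mk rest).get? (j : Int) with _ | w
      · simp [List.getD_eq_getElem?_getD, List.getElem?_set_ne htne]
      · simp

-- Elementwise value of B's pad-and-append pass over a strictly key-increasing list whose keys all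
-- lie at or beyond the current output length: entries below out.length are untouched, entries up
-- to the last key hold the (unique) association-list value there ('' on a gap), nothing beyond.
lemma fill_getElem? (s : List (Int × String)) (out : List String) (j : Nat)
    (hsorted : s.Pairwise (fun a b => a.1 < b.1))
    (hge : ∀ p ∈ s, (out.length : Int) ≤ p.1) :
    (s.foldl (fun out kv => (out ++ PySem.List.pyRepeat [""] (kv.1 - out.length)) ++ [kv.2]) out)[j]? =
      if j < out.length then out[j]?
      else
        match s.getLast? with
        | none => none
        | some last =>
          if (j : Int) ≤ last.1 then some (((PySem.Dict.mk s).get? (j : Int)).getD "") else none := by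
  induction s generalizing out with
  | nil =>
    by_cases hj : j < out.length
    · simp [hj]
    · simp [hj]
  | cons kv rest ih =>
    obtain ⟨k, v⟩ := kv
    have hk : (out.length : Int) ≤ k := hge (k, v) (by simp)
    have hklt : ∀ p ∈ rest, k < p.1 := by
      intro p hp; exact (List.pairwise_cons.mp hsorted).1 p hp
    -- the new accumulator after processing (k, v)
    set out' : List String := (out ++ PySem.List.pyRepeat [""] (k - out.length)) ++ [v] with hout'
    have hrep : PySem.List.pyRepeat [""] (k - out.length) = List.replicate (k - out.length).toNat "" :=
      PySem.List.pyRepeat_singleton "" _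
    have hlen' : (out'.length : Int) = k + 1 := by
      simp [hout', hrep]; omega
    have hIH := ih out' (List.pairwise_cons.mp hsorted).2
      (fun p hp => by have := hklt p hp; omega)
    rw [List.foldl_cons, hIH]
    have hlastge : ∀ last ∈ ((k, v) :: rest).getLast?, k ≤ last.1 := by
      intro last hlast
      rcases List.mem_getLast?_eq_getLast hlast with ⟨hne, hlasteq⟩
      have hmem := List.getLast_mem hne
      rw [← hlasteq] at hmem
      rcases List.mem_cons.mp hmem with h | h
      · rw [h]
      · exact le_of_lt (hklt last h)
    have hplen : (((out ++ PySem.List.pyRepeat [""] (k - out.length)).length : Int)) = k := by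
      simp [hrep]; omega
    by_cases hj : j < out.length
    · -- untouched prefix
      have hj' : j < out'.length := by omega
      have : out'[j]? = out[j]? := by
        rw [hout']
        rw [List.getElem?_append_left (by omega), List.getElem?_append_left hj]
      rw [if_pos hj', this, if_pos hj]
    · rw [if_neg hj]
      by_cases hj' : j < out'.length
      · -- j is in the freshly written region: the pad or the appended value
        rw [if_pos hj']
        have hjk : (j : Int) ≤ k := by omega
        have hlast : ∀ last ∈ ((k, v) :: rest).getLast?, (j : Int) ≤ last.1 :=
          fun last hl => le_trans hjk (hlastge last hl)
        have hget : out'[j]? = some (((PySem.Dict.mk ((k, v) :: rest)).get? (j : Int)).getD "") := by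
          rw [PySem.Dict.get?_mk_cons]
          by_cases hkj : k = (j : Int)
          · -- the appended value v, keys of rest never equal j
            have hjeq : j = (out ++ PySem.List.pyRepeat [""] (k - out.length)).length := by omega
            have hv : out'[j]? = some v := by
              rw [hout', hjeq]; exact List.getElem?_concat_length
            rw [hv]
            simp [hkj]
          · -- inside the pad: '' ; rest's keys all exceed k > j
            have hne : (k == (j : Int)) = false := by simp [hkj]
            have hrest : (PySem.Dict.mk rest).get? (j : Int) = none := by
              rw [PySem.Dict.get?_eq_none_iff_not_mem_keys]
              intro hmem
              rw [PySem.Dict.keys_mk] at hmem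
              obtain ⟨p, hp, hpe⟩ := List.mem_map.mp hmem
              have := hklt p hp; omega
            have hjk' : (j : Int) < k := lt_of_le_of_ne hjk (fun h => hkj h.symm)
            have hjlt : j < (out ++ PySem.List.pyRepeat [""] (k - out.length)).length := by omega
            rw [hout', List.getElem?_append_left hjlt,
              List.getElem?_append_right (Nat.le_of_not_lt hj), hrep]
            simp [hne, hrest]
            simp [List.getElem?_replicate]
            omega
        rcases hl : ((k, v) :: rest).getLast? with _ | last
        · simp at hl
        · have hm : last ∈ ((k, v) :: rest).getLast? := by rw [hl]; exact rfl
          rw [hget]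
          simp [hlast last hm]
      · -- j lies beyond the region written so far: defer to the tail of the list
        rw [if_neg hj']
        have hjk : k < (j : Int) := by omega
        have hne : (k == (j : Int)) = false := by simp; omega
        rcases hrest : rest with _ | ⟨p, rest'⟩
        · simp [if_neg (by omega : ¬ (j : Int) ≤ k)]
        · rw [← hrest]
          have hlcons : ((k, v) :: rest).getLast? = rest.getLast? := by
            rw [hrest]; simp [List.getLast?_cons_cons]
          rw [hlcons]
          rcases hl : rest.getLast? with _ | last
          · rfl
          · simp only []
            by_cases hjl : (j : Int) ≤ last.1
            · simp [hjl, PySem.Dict.get?_mk_cons, hne]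
            · simp [hjl]

-- For dicts (Nodup keys), lookup is insensitive to the order of the association list.
lemma get?_perm (l₁ l₂ : List (Int × String)) (hp : l₁.Perm l₂)
    (hnd : (l₁.map Prod.fst).Nodup) (x : Int) :
    (PySem.Dict.mk l₁).get? x = (PySem.Dict.mk l₂).get? x := by
  have hnd₂ : (l₂.map Prod.fst).Nodup := ((hp.map Prod.fst).nodup_iff).mp hnd
  have hk₁ : (PySem.Dict.mk l₁).keys.Nodup := by simpa [PySem.Dict.keys_mk] using hnd
  have hk₂ : (PySem.Dict.mk l₂).keys.Nodup := by simpa [PySem.Dict.keys_mk] using hnd₂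
  rcases h : (PySem.Dict.mk l₁).get? x with _ | v
  · rw [PySem.Dict.get?_eq_none_iff_not_mem_keys] at h
    symm
    rw [PySem.Dict.get?_eq_none_iff_not_mem_keys]
    simp only [PySem.Dict.keys_mk] at h ⊢
    exact fun hm => h ((hp.map Prod.fst).mem_iff.mpr hm)
  · have hmem : (x, v) ∈ l₁ := PySem.Dict.mem_items_of_get?_eq_some _ h
    exact (PySem.Dict.get?_of_mem_items _ (hp.mem_iff.mp hmem) hk₂).symm

theorem row_cells_to_list_py_spec : Claim_equal_row_cells_to_list_py := by
  intro cells _ hpre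
  obtain ⟨hnd, hpos⟩ := hpre
  unfold Spec_row_cells_to_list_py row_cells_to_list_py row_cells_to_list_py_alt
  by_cases hnil : cells = []
  · simp [hnil, PySem.List.sorted]
  · simp only [hnil, if_false]
    rcases hmx : PySem.List.max? (cells.map (·.1)) (fun x => x) with _ | mx
    · exact absurd ((PySem.List.max?_eq_none_iff _ _).mp hmx) (by simpa using hnil)
    · have hmem : mx ∈ cells.map (·.1) := PySem.List.max?_mem hmx
      have hmx0 : 0 ≤ mx := by
        obtain ⟨p, hp, hpe⟩ := List.mem_map.mp hmem
        exact hpe ▸ hpos p hp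
      have hmax : ∀ y ∈ cells.map (·.1), y ≤ mx := PySem.List.max?_isMax hmx
      set s : List (Int × String) := PySem.List.sorted cells (fun kv => kv.1) false with hs
      have hperm : s.Perm cells := PySem.List.sorted_perm cells _ false
      have hnds : (s.map Prod.fst).Nodup := ((hperm.map Prod.fst).nodup_iff).mpr hnd
      -- the sorted list has strictly increasing keys
      have hlt : s.Pairwise (fun a b => a.1 < b.1) := by
        have hle : s.Pairwise (fun a b => a.1 ≤ b.1) := by
          rw [hs]; exact PySem.List.sorted_pairwise cells (fun kv => kv.1)
        have hne : s.Pairwise (fun a b => a.1 ≠ b.1) := by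
          rw [← List.pairwise_map (f := Prod.fst)] at *
          exact hnds
        exact (hle.and hne).imp (fun h => lt_of_le_of_ne h.1 h.2)
      have hsnil : s ≠ [] := by
        intro h; rw [h] at hperm; exact hnil hperm.symm.eq_nil
      -- the last key of s is mx
      have hlastmx : ∀ last ∈ s.getLast?, last.1 = mx := by
        intro last hl
        obtain ⟨hne, hlasteq⟩ := List.mem_getLast?_eq_getLast hl
        have hlen0 : 0 < s.length := List.length_pos_iff.mpr hne
        have hlast_eq : last = s[s.length - 1]'(by omega) :=
          hlasteq.trans (List.getLast_eq_getElem hne)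
        have hmems : last ∈ s := hlasteq ▸ List.getLast_mem hne
        have h1 : last.1 ≤ mx :=
          hmax last.1 (List.mem_map.mpr ⟨last, hperm.mem_iff.mp hmems, rfl⟩)
        obtain ⟨p, hp, hpe⟩ := List.mem_map.mp hmem
        obtain ⟨i, hi, hieq⟩ := List.mem_iff_getElem.mp (hperm.mem_iff.mpr hp)
        have h2 : p.1 ≤ last.1 := by
          rw [hlast_eq, ← hieq]
          have := PySem.List.key_sorted_getElem_mono (xs := cells) (key := fun kv => kv.1)
            (p := i) (q := s.length - 1) (by rw [hs] at hi ⊢; omega) (by rw [hs] at hi ⊢; omega)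
          simpa [← hs] using this
        have h3 : mx ≤ last.1 := le_trans (le_of_eq hpe.symm) h2
        omega
      set n : Nat := (mx + 1).toNat with hn
      have hrep : PySem.List.pyRepeat [""] (mx + 1) = List.replicate n "" :=
        PySem.List.pyRepeat_singleton "" (mx + 1)
      simp only [hmx, hrep]
      apply List.ext_getElem?
      intro j
      rw [fill_getElem? s [] j hlt (fun p hp => by
        have : 0 ≤ p.1 := hpos p (hperm.mem_iff.mp hp); simpa using this)]
      by_cases hj : j < n
      · rw [scatter_getElem? cells (List.replicate n "") j (by simpa using hj) hpos hnd]
        rcases hl : s.getLast? with _ | last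
        · exact absurd (List.getLast?_eq_none_iff.mp hl) hsnil
        · have hlm := hlastmx last (by simp [hl])
          have h2 : (j : Int) ≤ last.1 := by omega
          rw [get?_perm cells s hperm.symm hnd (j : Int)]
          simp [h2, hj, List.getD_eq_getElem?_getD]
      · have h1 : (cells.foldl (fun out kv => PySem.List.pySetD out kv.1 kv.2)
            (List.replicate n ""))[j]? = none := by
          rw [List.getElem?_eq_none_iff, scatter_length]
          simpa using Nat.le_of_not_lt hj
        rw [h1, if_neg (by simp)]
        rcases hl : s.getLast? with _ | last
        · rfl
        · have hlm := hlastmx last (by simp [hl])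
          simp [show ¬ (j : Int) ≤ last.1 by omega]
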